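-- pv_equiv track=rewrite | github.com/yuanxu-li/careercup | chapter16-moderate/16.22.py | print_k_moves
-- ===== SOURCE A (Python) =====
-- def print_k_moves(k):
-- 	"""
-- 	We use dict to store all passed squares. Each step, if the touched square is not visited yet, then
-- 	append it to the dict; if already visited, change the status of that square in dict. For each new square,
-- 	if the sum of x and y axis is even, it is white(represented by 0); otherwise, it is black(represented by 1).
-- 	The direction is represented as 0(right), 1(down), 2(left), 3(up).
-- 	>>> print_k_moves(5)
-- 	[[1, 1, 0], [0, 1, 1], [0, 0, 1], [1, 0, 1]]
-- 	"""
-- 	grid = {}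
-- 	# assume the ant starts with a white square at (0, 0)
-- 	cur = (0, 0)
-- 	grid[cur] = sum(cur) % 2
-- 	direction = 0
--
-- 	# move k steps
-- 	for i in range(k):
-- 		# flip color
-- 		# white: in grid and color is white or not in grid but is supposed to be white
-- 		if cur in grid and grid[cur] == 0 or cur not in grid and sum(cur) % 2 == 0:
-- 			grid[cur] = 1
-- 			direction = (direction + 1) % 4
-- 		# black: otherwise
-- 		else:
-- 			grid[cur] = 0
-- 			direction = (direction - 1) % 4
-- 		# move forward one unit
-- 		if direction == 0:
-- 			cur = (cur[0], cur[1] + 1)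
-- 		elif direction == 1:
-- 			cur = (cur[0] + 1, cur[1])
-- 		elif direction == 2:
-- 			cur = (cur[0], cur[1] - 1)
-- 		elif direction == 3:
-- 			cur = (cur[0] - 1, cur[1])
-- 		else:
-- 			raise Exception("Undefined direction value!")
-- 	# also append the last
-- 	if cur not in grid:
-- 		if sum(cur) % 2 == 0:
-- 			grid[cur] = 0
-- 		else:
-- 			grid[cur] = 1
--
-- 	# print out the final grid
-- 	# x-axis is vertical downward while y-axis is horizontal rightward.
--
-- 	x_max = max(p[0] for p in grid)
-- 	x_min = min(p[0] for p in grid)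
-- 	y_max = max(p[1] for p in grid)
-- 	y_min = min(p[1] for p in grid)
--
-- 	# we use a 2-d array to represent the grid as the result to be returned
-- 	result = []
--
-- 	for x in range(x_min, x_max+1):
-- 		row = []
-- 		for y in range(y_min, y_max+1):
-- 			if (x, y) in grid:
-- 				row.append(grid[(x, y)])
-- 			else:
-- 				if (x + y) % 2 == 0:
-- 					row.append(0)
-- 				else:
-- 					row.append(1)
-- 		result.append(row)
-- 	return result
-- ===== SOURCE B (Python) =====
-- def print_k_moves(k):
-- 	"""Closed form: on the checkerboard start the ant never revisits a square; it walks
-- 	the staircase p_i = (ceil(i/2), floor(i/2)), flipping p_0..p_{k-1}. So each cell's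
-- 	final color is its checkerboard parity, flipped iff it lies on the visited staircase."""
-- 	steps = max(k, 0)
-- 	x_max = (steps + 1) // 2
-- 	y_max = steps // 2
-- 	result = []
-- 	for x in range(x_max + 1):
-- 		row = []
-- 		for y in range(y_max + 1):
-- 			flipped = 1 if (x - y in (0, 1) and x + y < steps) else 0
-- 			row.append((x + y + flipped) % 2)
-- 		result.append(row)
-- 	return result
-- ===== Notes on version B (the rewrite author's own statement) =====
-- stated objective: alternative
-- what changed: B replaces A's step-by-step Langton-ant simulation with a dict of visited squares by a closed form: on the checkerboard start the ant never revisits a square and walks the staircase p_i=(ceil(i/2),floor(i/2)), so B computes the bounding box and every cell's color directly by arithmetic ((x+y+flip)%2 with flip iff the cell is one of the first k staircase cells), with no simulation loop and no dictionary.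
import Mathlib
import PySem

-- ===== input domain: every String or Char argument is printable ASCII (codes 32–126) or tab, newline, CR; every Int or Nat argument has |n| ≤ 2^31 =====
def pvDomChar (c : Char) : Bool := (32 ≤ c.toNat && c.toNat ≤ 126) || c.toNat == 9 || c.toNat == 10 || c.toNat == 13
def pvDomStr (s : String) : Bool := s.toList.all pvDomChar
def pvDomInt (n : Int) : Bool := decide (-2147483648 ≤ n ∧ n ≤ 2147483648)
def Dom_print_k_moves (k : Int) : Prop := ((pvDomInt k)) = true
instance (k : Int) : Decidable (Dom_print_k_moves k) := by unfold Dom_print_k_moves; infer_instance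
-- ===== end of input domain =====

-- B replaces A's Langton-ant simulation (dict of visited squares) with a closed form for the
-- ant's staircase path and computes every output cell by arithmetic; same result, no speed claim.

-- ===== PORT A =====
-- one loop iteration: flip the current square's color, turn, step forward
def pvStep (st : PySem.Dict (Int × Int) Int × (Int × Int) × Int) :
    PySem.Dict (Int × Int) Int × (Int × Int) × Int :=
  let grid := st.1
  let cur := st.2.1
  let dir := st.2.2
  -- `cur in grid and grid[cur] == 0 or cur not in grid and sum(cur) % 2 == 0`
  let white : Bool :=
    match grid.get? cur with
    | some v => v == 0
    | none => PySem.Int.mod (cur.1 + cur.2) 2 == 0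
  let gd :=
    if white then (grid.insert cur 1, PySem.Int.mod (dir + 1) 4)
    else (grid.insert cur 0, PySem.Int.mod (dir - 1) 4)
  let grid := gd.1
  let dir := gd.2
  let cur :=
    if dir = 0 then (cur.1, cur.2 + 1)
    else if dir = 1 then (cur.1 + 1, cur.2)
    else if dir = 2 then (cur.1, cur.2 - 1)
    else if dir = 3 then (cur.1 - 1, cur.2)
    else cur  -- dead branch: Python raises here, but dir = _ % 4 is always in {0,1,2,3}
  (grid, cur, dir)

def print_k_moves (k : Int) : List (List Int) :=
  let cur0 : Int × Int := (0, 0)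
  let grid0 : PySem.Dict (Int × Int) Int :=
    PySem.Dict.empty.insert cur0 (PySem.Int.mod (cur0.1 + cur0.2) 2)
  -- for i in range(k): ...
  let st := (PySem.List.pyRange 0 k 1).foldl (fun st _ => pvStep st) (grid0, cur0, 0)
  let grid := st.1
  let cur := st.2.1
  -- also append the last
  let grid :=
    if grid.contains cur then grid
    else grid.insert cur (if PySem.Int.mod (cur.1 + cur.2) 2 = 0 then 0 else 1)
  -- max/min over a nonempty generator: grid always contains (0, 0), so .getD 0 is never used
  let xmax := (PySem.List.max? (grid.keys.map Prod.fst) (fun v => v)).getD 0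
  let xmin := (PySem.List.min? (grid.keys.map Prod.fst) (fun v => v)).getD 0
  let ymax := (PySem.List.max? (grid.keys.map Prod.snd) (fun v => v)).getD 0
  let ymin := (PySem.List.min? (grid.keys.map Prod.snd) (fun v => v)).getD 0
  (PySem.List.pyRange xmin (xmax + 1) 1).foldl (fun result x =>
    result ++ [(PySem.List.pyRange ymin (ymax + 1) 1).foldl (fun row y =>
      row ++ [match grid.get? (x, y) with
              | some v => v
              | none => if PySem.Int.mod (x + y) 2 = 0 then 0 else 1]) []]) []

-- ===== PORT B =====
def print_k_moves_alt (k : Int) : List (List Int) :=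
  let steps := max k 0
  let xmax := PySem.Int.floordiv (steps + 1) 2
  let ymax := PySem.Int.floordiv steps 2
  (PySem.List.pyRange 0 (xmax + 1) 1).foldl (fun result x =>
    result ++ [(PySem.List.pyRange 0 (ymax + 1) 1).foldl (fun row y =>
      row ++ [let flipped : Int := if (x - y = 0 ∨ x - y = 1) ∧ x + y < steps then 1 else 0
              PySem.Int.mod (x + y + flipped) 2]) []]) []

-- ===== PRECONDITION & SPEC =====
def Spec_print_k_moves (k : Int) (out : List (List Int)) : Prop := out = print_k_moves_alt k
instance (k : Int) (out : List (List Int)) : Decidable (Spec_print_k_moves k out) := by unfold Spec_print_k_moves; infer_instance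

-- ===== CLAIM (what is proved, stated in full; the proofs are below) =====
def Claim_equal_print_k_moves : Prop := ∀ (k : Int), Dom_print_k_moves k → Spec_print_k_moves k (print_k_moves k)

-- ===== LEMMAS AND PROOFS =====

-- the ant's position after j steps: the staircase (ceil(j/2), floor(j/2))
def pvPos (j : Nat) : Int × Int := (((j : Int) + 1) / 2, (j : Int) / 2)

-- the final color recorded for staircase square j when k = n: flipped if visited, plain parity on the landing square
def pvVal (n j : Nat) : Int := if j < n then ((j : Int) + 1) % 2 else (j : Int) % 2

-- direction after j steps (also correct for j = 0)
def pvDir (j : Nat) : Int := if j % 2 = 1 then 1 else 0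

lemma pvPos_eq_iff (a : Nat) (x y : Int) :
    pvPos a = (x, y) ↔ (0 ≤ y ∧ (x - y = 0 ∨ x - y = 1) ∧ x + y = (a : Int)) := by
  simp only [pvPos, Prod.mk.injEq]; omega

-- lookup in the staircase association list, shifted by a
lemma pvGet_shift (n : Nat) (f : Nat → Int) : ∀ (a : Nat) (x y : Int),
    PySem.Dict.get? (PySem.Dict.mk ((List.range n).map (fun j => (pvPos (a + j), f (a + j))))) (x, y)
      = if 0 ≤ y ∧ (x - y = 0 ∨ x - y = 1) ∧ (a : Int) ≤ x + y ∧ x + y < (a : Int) + n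
        then some (f (x + y).toNat) else none := by
  induction n with
  | zero =>
    intro a x y
    rw [if_neg (by push_cast; omega)]
    rfl
  | succ n ih =>
    intro a x y
    rw [List.range_succ_eq_map, List.map_cons, List.map_map]
    have hcomp : ((fun j => (pvPos (a + j), f (a + j))) ∘ Nat.succ)
        = (fun j => (pvPos ((a + 1) + j), f ((a + 1) + j))) := by
      funext j
      have hj : a + j.succ = (a + 1) + j := by omega
      simp only [Function.comp_apply, hj]
    rw [hcomp, PySem.Dict.get?_mk_cons, Nat.add_zero]
    by_cases he : pvPos a = (x, y)
    · rw [if_pos (by exact beq_iff_eq.mpr he)]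
      rw [pvPos_eq_iff] at he
      rw [if_pos (by push_cast; omega)]
      congr 1
      congr 1
      omega
    · rw [if_neg (by simpa using he), ih (a + 1) x y]
      rw [pvPos_eq_iff] at he
      push_cast
      split_ifs with h1 h2 <;> first | rfl | (exfalso; omega)

lemma pvGet (n : Nat) (f : Nat → Int) (x y : Int) :
    PySem.Dict.get? (PySem.Dict.mk ((List.range n).map (fun j => (pvPos j, f j)))) (x, y)
      = if 0 ≤ y ∧ (x - y = 0 ∨ x - y = 1) ∧ x + y < (n : Int)
        then some (f (x + y).toNat) else none := by
  have h := pvGet_shift n f 0 x y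
  simp only [Nat.cast_zero, zero_add] at h
  rw [h]
  by_cases h0 : 0 ≤ y ∧ (x - y = 0 ∨ x - y = 1) ∧ x + y < (n : Int)
  · rw [if_pos ⟨h0.1, h0.2.1, by omega, by omega⟩, if_pos h0]
  · split_ifs with h1
    · exact absurd ⟨h1.1, h1.2.1, h1.2.2.2⟩ h0
    · rfl

lemma pvStep_eq (n : Nat) :
    pvStep (PySem.Dict.mk ((List.range n).map (fun j => (pvPos j, ((j : Int) + 1) % 2))), pvPos n, pvDir n)
      = (PySem.Dict.mk ((List.range (n + 1)).map (fun j => (pvPos j, ((j : Int) + 1) % 2))), pvPos (n + 1), pvDir (n + 1)) := by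
  have hget : PySem.Dict.get? (PySem.Dict.mk ((List.range n).map (fun j => (pvPos j, ((j : Int) + 1) % 2)))) (pvPos n) = none := by
    have h := pvGet n (fun j => ((j : Int) + 1) % 2) (pvPos n).1 (pvPos n).2
    simp only [Prod.mk.eta] at h
    rw [h, if_neg]
    simp only [pvPos]
    omega
  have hcont : PySem.Dict.contains (PySem.Dict.mk ((List.range n).map (fun j => (pvPos j, ((j : Int) + 1) % 2)))) (pvPos n) = false := by
    rw [PySem.Dict.contains_eq_isSome_get?, hget]
    rfl
  have hins : ∀ v : Int, (PySem.Dict.mk ((List.range n).map (fun j => (pvPos j, ((j : Int) + 1) % 2)))).insert (pvPos n) v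
      = PySem.Dict.mk ((List.range n).map (fun j => (pvPos j, ((j : Int) + 1) % 2)) ++ [(pvPos n, v)]) := by
    intro v
    apply PySem.Dict.ext
    rw [PySem.Dict.items_insert_of_not_contains _ v hcont]
  have hsum : (pvPos n).1 + (pvPos n).2 = (n : Int) := by simp only [pvPos]; omega
  have hrange : (List.range (n + 1)).map (fun j => (pvPos j, ((j : Int) + 1) % 2))
      = (List.range n).map (fun j => (pvPos j, ((j : Int) + 1) % 2)) ++ [(pvPos n, ((n : Int) + 1) % 2)] := by
    rw [List.range_succ, List.map_append, List.map_singleton]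
  have hmod : PySem.Int.mod ((n : Int)) 2 = (n : Int) % 2 := PySem.Int.mod_eq_emod_of_pos (by omega)
  simp only [pvStep, hget, hsum, hins, hmod]
  rcases Nat.even_or_odd n with he | ho
  · have h2 : n % 2 = 0 := Nat.even_iff.mp he
    have hw : ((n : Int) % 2 == 0) = true := by simp; omega
    rw [hw]
    have hv : ((n : Int) + 1) % 2 = 1 := by omega
    have h3 : (n + 1) % 2 = 1 := by omega
    simp only [if_true, pvDir, h2, hrange, hv, h3,
      PySem.Int.mod_eq_emod_of_pos (show (0:Int) < 4 by norm_num)]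
    norm_num [Prod.ext_iff]
    simp only [pvPos]
    constructor <;> omega
  · have h2 : n % 2 = 1 := Nat.odd_iff.mp ho
    have hw : ((n : Int) % 2 == 0) = false := by simp; omega
    rw [hw]
    have hv : ((n : Int) + 1) % 2 = 0 := by omega
    have h3 : (n + 1) % 2 = 0 := by omega
    simp only [Bool.false_eq_true, if_false, pvDir, h2, hrange, hv, h3,
      PySem.Int.mod_eq_emod_of_pos (show (0:Int) < 4 by norm_num)]
    norm_num [Prod.ext_iff]
    simp only [pvPos]
    constructor <;> omega

-- a 'for _ in range(...)' loop that ignores the index is function iteration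
lemma pvFoldl_iterate {α β : Type} (f : α → α) (l : List β) (init : α) :
    l.foldl (fun s _ => f s) init = f^[l.length] init := by
  induction l generalizing init with
  | nil => rfl
  | cons h t ih => rw [List.foldl_cons, List.length_cons, ih, Function.iterate_succ_apply]

-- state of A's simulation after n ≥ 1 steps
lemma pvLoop (n : Nat) (hn : 1 ≤ n) :
    pvStep^[n] (PySem.Dict.empty.insert ((0 : Int), (0 : Int)) (PySem.Int.mod ((0 : Int) + (0 : Int)) 2), ((0 : Int), (0 : Int)), (0 : Int))
      = (PySem.Dict.mk ((List.range n).map (fun j => (pvPos j, ((j : Int) + 1) % 2))), pvPos n, pvDir n) := by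
  induction n, hn using Nat.le_induction with
  | base => decide
  | succ n hn ih => rw [Function.iterate_succ_apply', ih, pvStep_eq n]

-- max/min of a generator over an (n+1)-element monotone sequence
lemma pvMaxD (g : Nat → Int) (n : Nat) (hmono : ∀ i j, i ≤ j → g i ≤ g j) :
    (PySem.List.max? ((List.range (n + 1)).map g) (fun v => v)).getD 0 = g n := by
  cases hm : PySem.List.max? ((List.range (n + 1)).map g) (fun v => v) with
  | none => rw [PySem.List.max?_eq_none_iff] at hm; simp at hm
  | some m =>
    have h1 := PySem.List.max?_isMax hm (g n) (by simp only [List.mem_map, List.mem_range]; exact ⟨n, by omega, rfl⟩)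
    have h2 := PySem.List.max?_mem hm
    simp only [List.mem_map, List.mem_range] at h2
    obtain ⟨j, hj, rfl⟩ := h2
    have h3 := hmono j n (by omega)
    simp only [Option.getD_some]
    omega

lemma pvMinD (g : Nat → Int) (n : Nat) (hmono : ∀ i j, i ≤ j → g i ≤ g j) :
    (PySem.List.min? ((List.range (n + 1)).map g) (fun v => v)).getD 0 = g 0 := by
  cases hm : PySem.List.min? ((List.range (n + 1)).map g) (fun v => v) with
  | none => rw [PySem.List.min?_eq_none_iff] at hm; simp at hm
  | some m =>
    have h1 := PySem.List.min?_isMin hm (g 0) (by simp only [List.mem_map, List.mem_range]; exact ⟨0, by omega, rfl⟩)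
    have h2 := PySem.List.min?_mem hm
    simp only [List.mem_map, List.mem_range] at h2
    obtain ⟨j, hj, rfl⟩ := h2
    have h3 := hmono 0 j (by omega)
    simp only [Option.getD_some]
    omega

-- ===== VERDICT (by name: the statement is the Claim_ definition above) =====
theorem print_k_moves_spec : Claim_equal_print_k_moves := by
  intro k hdom
  unfold Spec_print_k_moves
  by_cases hk : k ≤ 0
  · -- no steps: both grids are the single white start square
    have hA : PySem.List.pyRange 0 k 1 = [] := PySem.List.pyRange_one_eq_nil hk
    have hB : max k 0 = 0 := by omega
    simp only [print_k_moves, print_k_moves_alt, hA, hB]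
    decide
  · obtain ⟨n, rfl⟩ : ∃ n : Nat, k = (n : Int) := ⟨k.toNat, (Int.toNat_of_nonneg (by omega)).symm⟩
    have hn : 1 ≤ n := by omega
    have hlen : (PySem.List.pyRange 0 (n : Int) 1).length = n := by
      rw [PySem.List.length_pyRange_one]; omega
    simp only [print_k_moves, print_k_moves_alt]
    rw [pvFoldl_iterate, hlen, pvLoop n hn]
    dsimp only
    -- the final landing square pvPos n is fresh: the post-loop insert appends it
    have hget : PySem.Dict.get? (PySem.Dict.mk ((List.range n).map (fun j => (pvPos j, ((j : Int) + 1) % 2)))) (pvPos n) = none := by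
      have h := pvGet n (fun j => ((j : Int) + 1) % 2) (pvPos n).1 (pvPos n).2
      simp only [Prod.mk.eta] at h
      rw [h, if_neg]
      simp only [pvPos]
      omega
    have hcont : PySem.Dict.contains (PySem.Dict.mk ((List.range n).map (fun j => (pvPos j, ((j : Int) + 1) % 2)))) (pvPos n) = false := by
      rw [PySem.Dict.contains_eq_isSome_get?, hget]
      rfl
    rw [hcont]
    simp only [Bool.false_eq_true, if_false]
    have hv : (if PySem.Int.mod ((pvPos n).1 + (pvPos n).2) 2 = 0 then (0 : Int) else 1) = (n : Int) % 2 := by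
      rw [show (pvPos n).1 + (pvPos n).2 = (n : Int) from by simp only [pvPos]; omega,
        PySem.Int.mod_eq_emod_of_pos (show (0:Int) < 2 by norm_num)]
      split_ifs <;> omega
    rw [hv]
    have hivs : (PySem.Dict.mk ((List.range n).map (fun j => (pvPos j, ((j : Int) + 1) % 2)))).insert (pvPos n) ((n : Int) % 2)
        = PySem.Dict.mk ((List.range (n + 1)).map (fun j => (pvPos j, pvVal n j))) := by
      apply PySem.Dict.ext
      rw [PySem.Dict.items_insert_of_not_contains _ _ hcont]
      show _ ++ _ = List.map _ _
      rw [List.range_succ, List.map_append, List.map_singleton]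
      congr 1
      · apply List.map_congr_left
        intro j hj
        rw [List.mem_range] at hj
        simp only [pvVal, if_pos hj]
      · simp [pvVal]
    rw [hivs]
    -- extrema over the staircase's bounding box
    simp only [PySem.Dict.keys_mk, List.map_map]
    rw [pvMaxD _ n (by intro i j hij; simp only [Function.comp_apply, pvPos]; omega),
      pvMinD _ n (by intro i j hij; simp only [Function.comp_apply, pvPos]; omega),
      pvMaxD _ n (by intro i j hij; simp only [Function.comp_apply, pvPos]; omega),
      pvMinD _ n (by intro i j hij; simp only [Function.comp_apply, pvPos]; omega)]
    simp only [Function.comp_apply, pvPos]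
    norm_num
    -- norm_num already evaluated B's max/floordiv bounds and rewrote both builders as maps;
    -- compare the two maps cell by cell
    congr 1
    apply List.map_congr_left
    intro x hx
    rw [PySem.List.mem_pyRange_one] at hx
    congr 1
    congr 1
    apply List.map_congr_left
    intro y hy
    rw [PySem.List.mem_pyRange_one] at hy
    congr 1
    -- per-cell equality
    rw [show (fun j : Nat => ((((j : Int) + 1) / 2, (j : Int) / 2), pvVal n j)) = (fun j => (pvPos j, pvVal n j)) from rfl,
      pvGet (n + 1) (pvVal n) x y]
    have hbox : x + y ≤ (n : Int) := by omega
    by_cases hd : x - y = 0 ∨ x - y = 1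
    · rw [if_pos (show 0 ≤ y ∧ (x - y = 0 ∨ x - y = 1) ∧ x + y < ((n + 1 : Nat) : Int) from ⟨by omega, hd, by push_cast; omega⟩)]
      dsimp only
      obtain ⟨s, hs⟩ : ∃ s : Nat, x + y = (s : Int) := ⟨(x + y).toNat, by omega⟩
      rw [hs, Int.toNat_natCast]
      simp only [pvVal]
      split_ifs <;> first | rfl | (exfalso; omega)
    · rw [if_neg (show ¬(0 ≤ y ∧ (x - y = 0 ∨ x - y = 1) ∧ x + y < ((n + 1 : Nat) : Int)) from by push_cast; omega)]
      dsimp only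
      split_ifs <;> omega
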